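-- pv_equiv track=rewrite | github.com/LeeKangHo1/kiro-ai-literacy-tutor | agents/quiz/hint_generator.py | _get_elimination_hint
-- ===== SOURCE A (Python) =====
-- from typing import Dict, List, Any, Optional
--
-- def _get_elimination_hint(options: List[str], correct_answer: int) -> str:
--     """선택지 제거 힌트"""
--     if len(options) <= 2:
--         return "남은 선택지들을 신중히 비교해보세요."
--
--     # 정답이 아닌 선택지 중 하나를 제거 힌트로 제공
--     wrong_options = [i for i in range(len(options)) if i != correct_answer]
--     if wrong_options:
--         eliminate_idx = wrong_options[0]  # 첫 번째 오답 제거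
--         return f"선택지 {eliminate_idx + 1}번은 정답이 아닙니다. 나머지 선택지들을 다시 검토해보세요."
--
--     return "각 선택지를 문제와 연결해서 생각해보세요."
-- ===== SOURCE B (Python) =====
-- def _get_elimination_hint(options, correct_answer):
--     if len(options) <= 2:
--         return "남은 선택지들을 신중히 비교해보세요."
--     # first index != correct_answer is 1 iff correct_answer == 0, else 0
--     eliminate_idx = 1 if correct_answer == 0 else 0
--     return f"선택지 {eliminate_idx + 1}번은 정답이 아닙니다. 나머지 선택지들을 다시 검토해보세요."
-- ===== Notes on version B (the rewrite author's own statement) =====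
-- stated objective: simpler
-- what changed: Replaces the wrong-options list comprehension plus [0] indexing with the closed form eliminate_idx = 1 if correct_answer == 0 else 0, and drops the unreachable final return.
import Mathlib
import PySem

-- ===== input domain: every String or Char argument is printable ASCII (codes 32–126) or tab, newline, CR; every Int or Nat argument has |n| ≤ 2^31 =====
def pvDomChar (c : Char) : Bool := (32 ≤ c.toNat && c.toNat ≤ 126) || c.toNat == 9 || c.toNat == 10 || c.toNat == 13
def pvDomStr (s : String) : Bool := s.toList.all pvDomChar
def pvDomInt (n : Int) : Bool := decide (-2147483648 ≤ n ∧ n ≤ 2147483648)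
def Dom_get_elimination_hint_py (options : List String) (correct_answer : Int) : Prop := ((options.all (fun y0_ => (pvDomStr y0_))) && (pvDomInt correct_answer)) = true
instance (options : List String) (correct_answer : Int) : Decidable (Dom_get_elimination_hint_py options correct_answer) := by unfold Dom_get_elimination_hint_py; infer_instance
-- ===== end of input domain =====

-- B replaces the wrong-options comprehension + [0] indexing by the closed form
-- 'eliminate_idx = 1 if correct_answer == 0 else 0' and drops the unreachable final return (objective: simpler).

-- ===== PORT A =====
def get_elimination_hint_py (options : List String) (correct_answer : Int) : String :=
  if options.length ≤ 2 then
    "남은 선택지들을 신중히 비교해보세요."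
  else
    let wrong_options := (PySem.List.pyRange 0 options.length 1).filter (fun i => i ≠ correct_answer)
    match wrong_options with
    | eliminate_idx :: _ =>
        "선택지 " ++ PySem.Int.toStr (eliminate_idx + 1) ++ "번은 정답이 아닙니다. 나머지 선택지들을 다시 검토해보세요."
    | [] => "각 선택지를 문제와 연결해서 생각해보세요."

-- ===== PORT B =====
def get_elimination_hint_py_alt (options : List String) (correct_answer : Int) : String :=
  if options.length ≤ 2 then
    "남은 선택지들을 신중히 비교해보세요."
  else
    let eliminate_idx : Int := if correct_answer = 0 then 1 else 0
    "선택지 " ++ PySem.Int.toStr (eliminate_idx + 1) ++ "번은 정답이 아닙니다. 나머지 선택지들을 다시 검토해보세요."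

-- ===== PRECONDITION & SPEC =====
def Spec_get_elimination_hint_py (options : List String) (correct_answer : Int) (out : String) : Prop := out = get_elimination_hint_py_alt options correct_answer
instance (options : List String) (correct_answer : Int) (out : String) : Decidable (Spec_get_elimination_hint_py options correct_answer out) := by unfold Spec_get_elimination_hint_py; infer_instance

-- ===== CLAIM (what is proved, stated in full; the proofs are below) =====
def Claim_equal_get_elimination_hint_py : Prop := ∀ (options : List String) (correct_answer : Int), Dom_get_elimination_hint_py options correct_answer → Spec_get_elimination_hint_py options correct_answer (get_elimination_hint_py options correct_answer)

-- ===== LEMMAS AND PROOFS =====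

-- With length ≥ 3, the first element of [0,1,...,n-1] differing from c is 1 if c = 0, else 0.
lemma filter_head (n : Int) (c : Int) (hn : 3 ≤ n) :
    (PySem.List.pyRange 0 n 1).filter (fun i => i ≠ c)
      = (if c = 0 then (1 : Int) else 0) :: ((PySem.List.pyRange 0 n 1).filter (fun i => i ≠ c)).tail := by
  rw [PySem.List.pyRange_one_cons (by omega), PySem.List.pyRange_one_cons (by omega)]
  by_cases hc : c = 0
  · simp [hc]
  · have h0 : ¬ ((0:Int) = c) := fun h => hc h.symm
    simp [hc, h0]

-- ===== VERDICT (by name: the statement is the Claim_ definition above) =====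
theorem get_elimination_hint_py_spec : Claim_equal_get_elimination_hint_py := by
  intro options c _
  unfold Spec_get_elimination_hint_py get_elimination_hint_py get_elimination_hint_py_alt
  by_cases hlen : options.length ≤ 2
  · simp [hlen]
  · have h3 : (3 : Int) ≤ options.length := by omega
    simp only [if_neg hlen]
    rw [filter_head _ c h3]
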